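-- pv_equiv track=rewrite | github.com/CCTSAI-Tony/leetcode | bytedanceOA.py | minimumCharacterTransformation
-- ===== SOURCE A (Python) =====
-- def minimumCharacterTransformation(s1, s2):
--     m = {}
--     if not check(s1, s2, m):
--         return -1
--     count = 0
--     visited = set()
--     for k in m:
--         if k not in visited:
--             count += helper(k, m, visited, 0)
--     return count
--
-- def helper(k, m, visited, path):
--     if k not in m:
--         return path
--     if k in visited:
--         return path+1
--     visited.add(k)
--     return helper(m[k], m, visited, path+1)
--
-- def check(s1, s2, m):
--     for i in range(len(s1)):
--         if s1[i] == s2[i]: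
--             continue
--         elif s1[i] not in m:
--             m[s1[i]] = s2[i]
--         elif m[s1[i]] != s2[i]:
--             return False
--     return True
-- ===== SOURCE B (Python) =====
-- def minimumCharacterTransformation(s1, s2):
--     pairs = [(a, b) for a, b in zip(s1, s2) if a != b]
--     m = dict(pairs)
--     if any(m[a] != b for a, b in pairs):
--         return -1
--     total = 0
--     rem = dict(m)
--     for k in m:
--         if k in rem:
--             cur, steps = k, 0
--             while cur in rem:
--                 cur, steps = rem.pop(cur), steps + 1
--             total += steps + (1 if cur in m else 0)
--     return total
-- ===== Notes on version B (the rewrite author's own statement) =====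
-- stated objective: alternative
-- what changed: B builds the char map in two staged passes (filtered zip pair list, dict() of it, then a single any() consistency check) instead of A's incremental check() with early dict mutation, and replaces A's recursive helper with a shared visited set by a destructive walk that pops each visited key out of a remaining-keys dict, testing chain ends by membership in the original map.
import Mathlib
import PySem

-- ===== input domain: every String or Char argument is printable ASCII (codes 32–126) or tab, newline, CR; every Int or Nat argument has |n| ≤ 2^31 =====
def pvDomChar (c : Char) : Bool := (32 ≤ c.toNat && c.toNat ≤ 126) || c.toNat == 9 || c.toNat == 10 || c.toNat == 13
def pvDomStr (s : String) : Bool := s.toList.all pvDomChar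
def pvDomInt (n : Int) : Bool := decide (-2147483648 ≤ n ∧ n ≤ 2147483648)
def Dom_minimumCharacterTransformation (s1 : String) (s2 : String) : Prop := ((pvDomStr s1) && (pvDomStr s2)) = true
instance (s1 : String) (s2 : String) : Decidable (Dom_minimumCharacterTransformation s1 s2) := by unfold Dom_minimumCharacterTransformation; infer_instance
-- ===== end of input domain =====

-- B builds the map by two staged passes (filtered pair list, dict() of it, one any() check)
-- instead of A's incremental check(), and walks each chain by popping keys out of a
-- remaining-keys dict instead of A's recursive helper with a shared visited set; same cost,
-- different decomposition. Return-value equivalence (neither mutates a caller-visible argument).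

-- ===== PORT A =====
-- A's check(): loop over i in range(len(s1)); ported as parallel structural recursion on the two
-- character lists. The (_, []) case is where Python's s2[i] raises IndexError (outside Pre_).
def checkA : List Char → List Char → PySem.Dict Char Char → Bool × PySem.Dict Char Char
  | [], _, m => (true, m)
  | _ :: _, [], m => (true, m)   -- unreachable under Pre_: Python raises IndexError here
  | a :: t1, b :: t2, m =>
    if a = b then checkA t1 t2 m
    else match m.get? a with
      | none => checkA t1 t2 (m.insert a b)
      | some v => if v ≠ b then (false, m) else checkA t1 t2 m

-- A's helper(): tail recursion; fuel m.size+1 bounds the depth (each consuming step adds a fresh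
-- key of m to visited), so the fuel-0 branch is never reached by the call below.
def helperA : Nat → Char → PySem.Dict Char Char → PySem.Set Char → Int → Int × PySem.Set Char
  | 0, _, _, vis, path => (path, vis)
  | n + 1, k, m, vis, path =>
    match m.get? k with
    | none => (path, vis)
    | some v =>
      if vis.contains k then (path + 1, vis)
      else helperA n v m (PySem.Set.add vis k) (path + 1)

def minimumCharacterTransformation (s1 : String) (s2 : String) : Int :=
  let r := checkA s1.toList s2.toList PySem.Dict.empty
  if r.1 = false then -1
  else
    (r.2.keys.foldl (fun (st : Int × PySem.Set Char) k =>
        if st.2.contains k then st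
        else
          let h := helperA (r.2.size + 1) k r.2 st.2 0
          (st.1 + h.1, h.2)) (0, PySem.Set.empty)).1

-- ===== PORT B =====
-- B's pair list: [(a, b) for a, b in zip(s1, s2) if a != b]
def pvPairs (cs1 cs2 : List Char) : List (Char × Char) :=
  (cs1.zip cs2).filter (fun p => p.1 ≠ p.2)

-- B's m = dict(pairs): overwrite fold
def pvBuild (ps : List (Char × Char)) : PySem.Dict Char Char :=
  ps.foldl (fun d p => d.insert p.1 p.2) PySem.Dict.empty

-- B's 'while cur in rem' loop popping the key just visited; returns (steps, final cur, rem).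
-- Fuel rem.size+1 bounds the iterations: each one removes a key of rem.
def walkB : Nat → PySem.Dict Char Char → Char → Int → Int × Char × PySem.Dict Char Char
  | 0, rem, cur, steps => (steps, cur, rem)
  | n + 1, rem, cur, steps =>
    match rem.get? cur with
    | none => (steps, cur, rem)
    | some nxt => walkB n (rem.erase cur) nxt (steps + 1)

def minimumCharacterTransformation_alt (s1 : String) (s2 : String) : Int :=
  let ps := pvPairs s1.toList s2.toList
  let m := pvBuild ps
  if ps.any (fun p => !(m.get? p.1 == some p.2)) then -1
  else
    (m.keys.foldl (fun (st : Int × PySem.Dict Char Char) k =>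
        match st.2.get? k with
        | none => st
        | some _ =>
          let w := walkB (st.2.size + 1) st.2 k 0
          (st.1 + w.1 + (if (m.get? w.2.1).isSome then 1 else 0), w.2.2)) (0, m)).1

-- ===== PRECONDITION & SPEC =====
-- pvHasConflict: some key of s1 is mapped to two different characters within the first
-- min(len s1, len s2) positions — there A's check() returns False before any out-of-range index.
def pvHasConflict (cs1 cs2 : List Char) : Bool :=
  (List.range (min cs1.length cs2.length)).any (fun j =>
    (List.range j).any (fun i =>
      cs1.getD i ' ' == cs1.getD j ' ' && cs1.getD i ' ' != cs2.getD i ' ' &&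
      cs1.getD j ' ' != cs2.getD j ' ' && cs2.getD i ' ' != cs2.getD j ' '))

-- Pre_ is exactly where Python A returns: either s2 is long enough, or a mapping conflict makes
-- check() return False before s2[i] goes out of range.
def Pre_minimumCharacterTransformation (s1 : String) (s2 : String) : Prop :=
  s1.toList.length ≤ s2.toList.length ∨ pvHasConflict s1.toList s2.toList = true
instance (s1 : String) (s2 : String) : Decidable (Pre_minimumCharacterTransformation s1 s2) := by
  unfold Pre_minimumCharacterTransformation; infer_instance

def pvWitness_minimumCharacterTransformation : String × String := ("abc", "bca")

def Spec_minimumCharacterTransformation (s1 : String) (s2 : String) (out : Int) : Prop := out = minimumCharacterTransformation_alt s1 s2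
instance (s1 : String) (s2 : String) (out : Int) : Decidable (Spec_minimumCharacterTransformation s1 s2 out) := by unfold Spec_minimumCharacterTransformation; infer_instance

-- ===== CLAIM (what is proved, stated in full; the proofs are below) =====
def Claim_equal_minimumCharacterTransformation : Prop := ∀ (s1 : String) (s2 : String), Dom_minimumCharacterTransformation s1 s2 → Pre_minimumCharacterTransformation s1 s2 → Spec_minimumCharacterTransformation s1 s2 (minimumCharacterTransformation s1 s2)

-- ===== LEMMAS AND PROOFS =====

-- A's check() read as a single scan over the filtered pair list (first-binding semantics).
def firstCheck : List (Char × Char) → PySem.Dict Char Char → Bool × PySem.Dict Char Char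
  | [], m => (true, m)
  | p :: t, m =>
    match m.get? p.1 with
    | none => firstCheck t (m.insert p.1 p.2)
    | some v => if v ≠ p.2 then (false, m) else firstCheck t m

-- all pairs of P with equal keys carry equal values
def GoodPairs (P : List (Char × Char)) : Prop :=
  ∀ p ∈ P, ∀ q ∈ P, p.1 = q.1 → p.2 = q.2

theorem dict_get?_erase {ν : Type} (d : PySem.Dict Char ν) (k c : Char) :
    (d.erase k).get? c = if c = k then none else d.get? c := by
  obtain ⟨l⟩ := d
  simp only [PySem.Dict.erase, PySem.Dict.get?]
  induction l with
  | nil => simp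
  | cons p t ih =>
    by_cases h1 : p.1 = k <;> by_cases h2 : p.1 = c <;> simp_all

theorem dict_size_erase_lt {ν : Type} (d : PySem.Dict Char ν) (k : Char)
    (h : (d.get? k).isSome) : (d.erase k).size < d.size := by
  obtain ⟨l⟩ := d
  simp only [PySem.Dict.get?, Option.isSome_map, List.find?_isSome] at h
  obtain ⟨p, hp, hpk⟩ := h
  simp only [PySem.Dict.erase, PySem.Dict.size]
  exact List.length_filter_lt_length_iff_exists.mpr ⟨p, hp, by simp [hpk]⟩

theorem dict_insert_get?_self {ν : Type} (d : PySem.Dict Char ν) (k : Char) (v : ν)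
    (hnd : d.keys.Nodup) (h : d.get? k = some v) : d.insert k v = d := by
  apply PySem.Dict.ext
  rw [PySem.Dict.items_insert_of_contains _ _ (by rw [PySem.Dict.contains_eq_isSome_get?, h]; rfl)]
  conv_rhs => rw [← List.map_id d.items]
  apply List.map_congr_left
  intro p hp
  by_cases hpk : p.1 = k
  · have hv := PySem.Dict.get?_of_mem_items (d := d) (k := p.1) (v := p.2) (by simpa using hp) hnd
    rw [hpk, h] at hv
    cases p
    simp_all
  · simp [hpk]

theorem checkA_eq_firstCheck (cs1 : List Char) : ∀ (cs2 : List Char) (m : PySem.Dict Char Char),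
    checkA cs1 cs2 m = firstCheck (pvPairs cs1 cs2) m := by
  induction cs1 with
  | nil => intro cs2 m; cases cs2 <;> simp [checkA, pvPairs, firstCheck]
  | cons a t1 ih =>
    intro cs2 m
    cases cs2 with
    | nil => simp [checkA, pvPairs, firstCheck]
    | cons b t2 =>
      by_cases hab : a = b
      · simp only [checkA, if_pos hab, pvPairs, List.zip_cons_cons, List.filter]
        have : (decide ¬(a, b).1 = (a, b).2) = false := by simpa using hab
        simp only [this]
        simpa [pvPairs] using ih t2 m
      · simp only [checkA, if_neg hab, pvPairs, List.zip_cons_cons, List.filter]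
        have : (decide ¬(a, b).1 = (a, b).2) = true := by simpa using hab
        simp only [this, firstCheck]
        cases hm : m.get? a with
        | none => simpa [pvPairs] using ih t2 (m.insert a b)
        | some v =>
          by_cases hv : v = b
          · simpa [pvPairs, hv] using ih t2 m
          · simp [hv]

theorem firstCheck_true (P : List (Char × Char)) : ∀ (m : PySem.Dict Char Char),
    (firstCheck P m).1 = true →
    (∀ p ∈ P, ∀ v, m.get? p.1 = some v → p.2 = v) ∧ GoodPairs P := by
  induction P with
  | nil => intro m _; exact ⟨by simp, by intro p hp; simp at hp⟩
  | cons p t ih =>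
    intro m h
    rw [firstCheck] at h
    split at h
    · next hm =>
      obtain ⟨h1, hg⟩ := ih _ h
      have key : ∀ q ∈ t, q.1 = p.1 → q.2 = p.2 := by
        intro q hq hqp
        exact h1 q hq p.2 (by rw [hqp, PySem.Dict.get?_insert, if_pos rfl])
      constructor
      · intro q hq v hv
        rcases List.mem_cons.mp hq with rfl | hq
        · rw [hm] at hv; cases hv
        · by_cases hqp : q.1 = p.1
          · rw [hqp, hm] at hv; cases hv
          · exact h1 q hq v (by rwa [PySem.Dict.get?_insert, if_neg hqp])
      · intro q hq r hr hqr
        rcases List.mem_cons.mp hq with hq' | hq' <;> rcases List.mem_cons.mp hr with hr' | hr'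
        · rw [hq', hr']
        · rw [hq']; exact (key r hr' (by rw [← hqr, hq'])).symm
        · rw [hr']; exact key q hq' (by rw [hqr, hr'])
        · exact hg q hq' r hr' hqr
    · next v hm =>
      by_cases hv : v = p.2
      · rw [if_neg (by simpa using hv)] at h
        obtain ⟨h1, hg⟩ := ih _ h
        have key : ∀ q ∈ t, q.1 = p.1 → q.2 = p.2 := by
          intro q hq hqp
          rw [← hv]
          exact h1 q hq v (by rw [hqp, hm])
        constructor
        · intro q hq w hw
          rcases List.mem_cons.mp hq with rfl | hq
          · rw [hm] at hw; cases hw; exact hv.symm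
          · exact h1 q hq w hw
        · intro q hq r hr hqr
          rcases List.mem_cons.mp hq with hq' | hq' <;> rcases List.mem_cons.mp hr with hr' | hr'
          · rw [hq', hr']
          · rw [hq']; exact (key r hr' (by rw [← hqr, hq'])).symm
          · rw [hr']; exact key q hq' (by rw [hqr, hr'])
          · exact hg q hq' r hr' hqr
      · rw [if_pos (by simpa using hv)] at h
        exact absurd h (by simp)

theorem firstCheck_run (P : List (Char × Char)) : ∀ (m : PySem.Dict Char Char),
    m.keys.Nodup → (∀ p ∈ P, ∀ v, m.get? p.1 = some v → p.2 = v) → GoodPairs P →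
    firstCheck P m = (true, P.foldl (fun d q => d.insert q.1 q.2) m) := by
  induction P with
  | nil => intro m _ _ _; simp [firstCheck]
  | cons p t ih =>
    intro m hnd h1 hg
    rw [firstCheck, List.foldl_cons]
    cases hm : m.get? p.1 with
    | none =>
      have step := ih (m.insert p.1 p.2) (PySem.Dict.nodup_keys_insert _ _ _ hnd) ?_ ?_
      · simpa [hm] using step
      · intro q hq v hv
        by_cases hqp : q.1 = p.1
        · rw [hqp, PySem.Dict.get?_insert, if_pos rfl] at hv
          cases hv
          exact hg q (List.mem_cons_of_mem _ hq) p List.mem_cons_self hqp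
        · exact h1 q (List.mem_cons_of_mem _ hq) v (by rwa [PySem.Dict.get?_insert, if_neg hqp] at hv)
      · intro q hq r hr
        exact hg q (List.mem_cons_of_mem _ hq) r (List.mem_cons_of_mem _ hr)
    | some v =>
      have hpv : p.2 = v := h1 p List.mem_cons_self v hm
      have heq : m.insert p.1 p.2 = m := hpv ▸ dict_insert_get?_self m p.1 v hnd hm
      show (if v ≠ p.2 then (false, m) else firstCheck t m) =
        (true, List.foldl (fun d q => d.insert q.1 q.2) (m.insert p.1 p.2) t)
      rw [if_neg (by simp [hpv]), heq]
      exact ih m hnd (fun q hq => h1 q (List.mem_cons_of_mem _ hq))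
        (fun q hq r hr => hg q (List.mem_cons_of_mem _ hq) r (List.mem_cons_of_mem _ hr))

theorem foldl_insert_isSome_mono (P : List (Char × Char)) : ∀ (m : PySem.Dict Char Char) (a : Char),
    (m.get? a).isSome → ((P.foldl (fun d q => d.insert q.1 q.2) m).get? a).isSome := by
  induction P with
  | nil => intro m a h; simpa
  | cons p t ih =>
    intro m a h
    rw [List.foldl_cons]
    refine ih _ a ?_
    rw [PySem.Dict.get?_insert]
    split <;> simp_all

theorem foldl_insert_isSome_of_mem (P : List (Char × Char)) : ∀ (m : PySem.Dict Char Char)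
    (p : Char × Char), p ∈ P → ((P.foldl (fun d q => d.insert q.1 q.2) m).get? p.1).isSome := by
  induction P with
  | nil => intro m p h; simp at h
  | cons q t ih =>
    intro m p hp
    rw [List.foldl_cons]
    rcases List.mem_cons.mp hp with rfl | hp
    · exact foldl_insert_isSome_mono t _ p.1 (by rw [PySem.Dict.get?_insert, if_pos rfl]; rfl)
    · exact ih _ p hp

theorem foldl_insert_get?_orig (P : List (Char × Char)) : ∀ (m : PySem.Dict Char Char) (a v : Char),
    (P.foldl (fun d q => d.insert q.1 q.2) m).get? a = some v → (a, v) ∈ P ∨ m.get? a = some v := by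
  induction P with
  | nil => intro m a v h; exact Or.inr h
  | cons p t ih =>
    intro m a v h
    rw [List.foldl_cons] at h
    rcases ih _ a v h with h' | h'
    · exact Or.inl (List.mem_cons_of_mem _ h')
    · rw [PySem.Dict.get?_insert] at h'
      by_cases hap : a = p.1
      · rw [if_pos hap] at h'
        cases h'
        exact Or.inl (by rw [hap]; exact List.mem_cons_self)
      · rw [if_neg hap] at h'
        exact Or.inr h'

-- the chain walks of the two programs agree: visited-set recursion vs pop-from-rem loop
theorem walk_eq_helper (m : PySem.Dict Char Char) :
    ∀ (nB nA : Nat) (rem : PySem.Dict Char Char) (vis : PySem.Set Char) (cur : Char) (s : Int),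
      (∀ c, rem.get? c = if vis.contains c then none else m.get? c) →
      rem.size < nA → rem.size < nB →
      (helperA nA cur m vis s).1 =
        (walkB nB rem cur s).1 + (if (m.get? (walkB nB rem cur s).2.1).isSome then 1 else 0) ∧
      (∀ c, (walkB nB rem cur s).2.2.get? c =
        if (helperA nA cur m vis s).2.contains c then none else m.get? c) ∧
      (walkB nB rem cur s).2.2.size ≤ rem.size := by
  intro nB
  induction nB with
  | zero => intro nA rem vis cur s _ _ h; exact absurd h (Nat.not_lt_zero _)
  | succ nB ih =>
    intro nA rem vis cur s hinv hA hB
    cases nA with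
    | zero => exact absurd hA (Nat.not_lt_zero _)
    | succ nA =>
      cases hm : m.get? cur with
      | none =>
        have hrc : rem.get? cur = none := by rw [hinv]; split <;> simp [hm]
        simp [helperA, walkB, hm, hrc, hinv]
      | some v =>
        by_cases hv : vis.contains cur
        · have hrc : rem.get? cur = none := by rw [hinv, if_pos hv]
          have hv' : cur ∈ vis := (PySem.Set.contains_iff _ _).mp hv
          simp [helperA, walkB, hm, hrc, hv', hinv]
        · have hrc : rem.get? cur = some v := by rw [hinv, if_neg hv, hm]
          have hlt := dict_size_erase_lt rem cur (by simp [hrc])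
          have hinv' : ∀ c, (rem.erase cur).get? c =
              if (PySem.Set.add vis cur).contains c then none else m.get? c := by
            intro c
            rw [dict_get?_erase]
            by_cases hc : c = cur
            · subst hc; simp [PySem.Set.mem_add]
            · have hcc : (PySem.Set.add vis cur).contains c = vis.contains c := by
                by_cases h : c ∈ vis <;> simp [PySem.Set.mem_add, h, hc]
              rw [if_neg hc, hcc, hinv]
          have hrec := ih nA (rem.erase cur) (PySem.Set.add vis cur) v (s + 1) hinv'
            (by omega) (by omega)
          simp only [helperA, walkB, hm, hrc]
          rw [if_neg hv]
          exact ⟨hrec.1, hrec.2.1, le_trans hrec.2.2 (le_of_lt hlt)⟩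

-- the two outer loops over m.keys agree, given the visited/remaining correspondence
theorem fold_eq (m : PySem.Dict Char Char) :
    ∀ (ks : List Char), (∀ k ∈ ks, (m.get? k).isSome) →
    ∀ (tA tB : Int) (vis : PySem.Set Char) (rem : PySem.Dict Char Char),
      tA = tB →
      (∀ c, rem.get? c = if vis.contains c then none else m.get? c) →
      rem.size ≤ m.size →
      (ks.foldl (fun (st : Int × PySem.Set Char) k =>
          if st.2.contains k then st
          else
            let h := helperA (m.size + 1) k m st.2 0
            (st.1 + h.1, h.2)) (tA, vis)).1 =
      (ks.foldl (fun (st : Int × PySem.Dict Char Char) k =>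
          match st.2.get? k with
          | none => st
          | some _ =>
            let w := walkB (st.2.size + 1) st.2 k 0
            (st.1 + w.1 + (if (m.get? w.2.1).isSome then 1 else 0), w.2.2)) (tB, rem)).1 := by
  intro ks
  induction ks with
  | nil => intro _ tA tB vis rem ht _ _; simpa using ht
  | cons k t ih =>
    intro hks tA tB vis rem ht hinv hsz
    simp only [List.foldl_cons]
    by_cases hv : vis.contains k
    · have hrk : rem.get? k = none := by rw [hinv, if_pos hv]
      rw [if_pos hv]
      have hstep : (match rem.get? k with
          | none => (tB, rem)
          | some _ =>
            let w := walkB (rem.size + 1) rem k 0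
            (tB + w.1 + (if (m.get? w.2.1).isSome then 1 else 0), w.2.2)) = (tB, rem) := by
        rw [hrk]
      rw [hstep]
      exact ih (fun q hq => hks q (List.mem_cons_of_mem _ hq)) tA tB vis rem ht hinv hsz
    · obtain ⟨w0, hw0⟩ := Option.isSome_iff_exists.mp (hks k List.mem_cons_self)
      have hrk : rem.get? k = some w0 := by rw [hinv, if_neg hv, hw0]
      rw [if_neg hv]
      have hwalk := walk_eq_helper m (rem.size + 1) (m.size + 1) rem vis k 0 hinv
        (by omega) (by omega)
      have hstep : (match rem.get? k with
          | none => (tB, rem)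
          | some _ =>
            let w := walkB (rem.size + 1) rem k 0
            (tB + w.1 + (if (m.get? w.2.1).isSome then 1 else 0), w.2.2)) =
          (tB + (walkB (rem.size + 1) rem k 0).1 +
             (if (m.get? (walkB (rem.size + 1) rem k 0).2.1).isSome then 1 else 0),
           (walkB (rem.size + 1) rem k 0).2.2) := by
        rw [hrk]
      rw [hstep]
      exact ih (fun q hq => hks q (List.mem_cons_of_mem _ hq)) _ _ _ _
        (by rw [ht, hwalk.1]; ring) hwalk.2.1 (le_trans hwalk.2.2 hsz)

-- if some pair disagrees with dict(pairs), A's check() returns False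
theorem checkA_false_of_bad (cs1 cs2 : List Char)
    (h : (pvPairs cs1 cs2).any
      (fun p => !((pvBuild (pvPairs cs1 cs2)).get? p.1 == some p.2)) = true) :
    (checkA cs1 cs2 PySem.Dict.empty).1 = false := by
  rw [checkA_eq_firstCheck]
  by_contra hne
  have htrue : (firstCheck (pvPairs cs1 cs2) PySem.Dict.empty).1 = true := by
    cases hfc : (firstCheck (pvPairs cs1 cs2) PySem.Dict.empty).1
    · exact absurd hfc hne
    · rfl
  obtain ⟨_, hg⟩ := firstCheck_true _ _ htrue
  obtain ⟨p, hp, hpb⟩ := List.any_eq_true.mp h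
  obtain ⟨w, hw⟩ := Option.isSome_iff_exists.mp
    (foldl_insert_isSome_of_mem (pvPairs cs1 cs2) PySem.Dict.empty p hp)
  have hmem : (p.1, w) ∈ pvPairs cs1 cs2 := by
    rcases foldl_insert_get?_orig (pvPairs cs1 cs2) PySem.Dict.empty p.1 w hw with h' | h'
    · exact h'
    · rw [PySem.Dict.get?_empty] at h'; cases h'
  have : p.2 = w := hg p hp (p.1, w) hmem rfl
  rw [pvBuild, hw, ← this] at hpb
  simp at hpb

-- if every pair agrees with dict(pairs), A's check() succeeds and returns exactly dict(pairs)
theorem checkA_true_of_good (cs1 cs2 : List Char)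
    (h : (pvPairs cs1 cs2).any
      (fun p => !((pvBuild (pvPairs cs1 cs2)).get? p.1 == some p.2)) = false) :
    checkA cs1 cs2 PySem.Dict.empty = (true, pvBuild (pvPairs cs1 cs2)) := by
  have hall : ∀ p ∈ pvPairs cs1 cs2, (pvBuild (pvPairs cs1 cs2)).get? p.1 = some p.2 := by
    intro p hp
    have := List.any_eq_false.mp h p hp
    simpa using this
  have hg : GoodPairs (pvPairs cs1 cs2) := by
    intro p hp q hq hpq
    have h1 := hall p hp
    have h2 := hall q hq
    rw [hpq, h2] at h1
    exact (Option.some_injective _ h1).symm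
  rw [checkA_eq_firstCheck]
  exact firstCheck_run _ PySem.Dict.empty PySem.Dict.nodup_keys_empty
    (by intro p hp v hv; rw [PySem.Dict.get?_empty] at hv; cases hv) hg

-- ===== VERDICT (by name: the statement is the Claim_ definition above) =====
theorem minimumCharacterTransformation_spec : Claim_equal_minimumCharacterTransformation := by
  intro s1 s2 _ _
  unfold Spec_minimumCharacterTransformation minimumCharacterTransformation minimumCharacterTransformation_alt
  by_cases hbad : (pvPairs s1.toList s2.toList).any
      (fun p => !((pvBuild (pvPairs s1.toList s2.toList)).get? p.1 == some p.2)) = true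
  · have hf := checkA_false_of_bad s1.toList s2.toList hbad
    simp [hf, hbad]
  · have hbad' : (pvPairs s1.toList s2.toList).any
        (fun p => !((pvBuild (pvPairs s1.toList s2.toList)).get? p.1 == some p.2)) = false := by
      simpa using hbad
    have ht := checkA_true_of_good s1.toList s2.toList hbad'
    simp only [ht, hbad', Bool.false_eq_true, Bool.true_eq_false, if_false]
    refine fold_eq (pvBuild (pvPairs s1.toList s2.toList)) _ ?_ 0 0
      PySem.Set.empty (pvBuild (pvPairs s1.toList s2.toList)) rfl ?_ le_rfl
    · intro k hk
      cases hik : (pvBuild (pvPairs s1.toList s2.toList)).get? k with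
      | none => exact absurd hk ((PySem.Dict.get?_eq_none_iff_not_mem_keys _ _).mp hik)
      | some w => rfl
    · intro c
      simp [PySem.Set.empty, PySem.Set.contains]
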